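-- pv_equiv track=rewrite | github.com/zxy180/dddfdf | gp_algorithm/gp_algorithm/search_range.py | generate_all_modified_sentences_fast
-- ===== SOURCE A (Python) =====
-- def generate_all_modified_sentences_fast(S, V, target_positions, k=1):
--     spaces = '_' * k
--     extended_str = ''.join([spaces + c for c in S]) + spaces
--     init_extended = list(extended_str)
--     extended_length = len(init_extended)
--
--     init_mask = []
--     for _ in range(len(S)):
--         init_mask += [0] * k + [1]
--     init_mask += [0] * k
--     assert len(init_mask) == extended_length, "扩展句与掩码长度不一致"
--
--     vocab_indices = list(range(len(V)))
--     pos_char_candidates = [vocab_indices for _ in target_positions]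
--
--     all_extended = []
--     all_shrunk = []
--     all_masks = []
--
--     def generate_combinations(candidates, current=[]):
--         if not candidates:
--             yield current
--             return
--         for char_idx in candidates[0]:
--             yield from generate_combinations(candidates[1:], current + [char_idx])
--
--     for char_combo in generate_combinations(pos_char_candidates):
--         new_extended = init_extended.copy()
--         new_mask = init_mask.copy()
--
--         for pos_idx, vocab_idx in enumerate(char_combo):
--             z = target_positions[pos_idx]
--             if z < 0 or z >= extended_length:
--                 continue
--
--             if V[vocab_idx] != -1:
--                 new_extended[z] = chr(V[vocab_idx])
--                 new_mask[z] = 1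
--             else:
--                 new_extended[z] = '_'
--                 new_mask[z] = 0
--
--         all_extended.append(''.join(new_extended))
--         all_masks.append(new_mask)
--
--         shrunk_chars = [new_extended[i] for i in range(extended_length) if new_mask[i] == 1]
--         all_shrunk.append(''.join(shrunk_chars))
--
--     return all_extended, all_shrunk, all_masks
-- ===== SOURCE B (Python) =====
-- def generate_all_modified_sentences_fast(S, V, target_positions, k=1):
--     # Backtracking in-place recursion over target_positions (instead of
--     # materialising all index combinations and re-applying each from scratch).
--     pad = '_' * k
--     ext = []
--     mask = []
--     for c in S:
--         ext += pad
--         ext.append(c)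
--         mask += [0] * len(pad)
--         mask.append(1)
--     ext += pad
--     mask += [0] * len(pad)
--     n = len(ext)
--
--     all_extended = []
--     all_shrunk = []
--     all_masks = []
--
--     def rec(d):
--         if d == len(target_positions):
--             all_extended.append(''.join(ext))
--             all_masks.append(list(mask))
--             all_shrunk.append(''.join(c for c, m in zip(ext, mask) if m == 1))
--             return
--         z = target_positions[d]
--         if z < 0 or z >= n:
--             for _ in V:
--                 rec(d + 1)
--             return
--         old_c, old_m = ext[z], mask[z]
--         for v in V:
--             if v != -1:
--                 ext[z] = chr(v)
--                 mask[z] = 1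
--             else:
--                 ext[z] = '_'
--                 mask[z] = 0
--             rec(d + 1)
--         ext[z], mask[z] = old_c, old_m
--
--     rec(0)
--     return all_extended, all_shrunk, all_masks
-- ===== Notes on version B (the rewrite author's own statement) =====
-- stated objective: alternative
-- what changed: B replaces A's two-phase scheme (materialise every vocab-index combination with a recursive generator, then re-apply each combination to a fresh copy of the extended list) by a single in-place backtracking recursion over target_positions that mutates one shared extended/mask buffer and snapshots the three outputs at each leaf; the base buffers and the shrunk string are built by a single zip-style pass instead of index loops. …
-- outside the precondition, e.g. on generate_all_modified_sentences_fast('a', [-2], [1], 1): A raises ValueError, B raises ValueError; on generate_all_modified_sentences_fast('a', [1114112], [1], 1): A raises ValueError, B raises ValueError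
import Mathlib
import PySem

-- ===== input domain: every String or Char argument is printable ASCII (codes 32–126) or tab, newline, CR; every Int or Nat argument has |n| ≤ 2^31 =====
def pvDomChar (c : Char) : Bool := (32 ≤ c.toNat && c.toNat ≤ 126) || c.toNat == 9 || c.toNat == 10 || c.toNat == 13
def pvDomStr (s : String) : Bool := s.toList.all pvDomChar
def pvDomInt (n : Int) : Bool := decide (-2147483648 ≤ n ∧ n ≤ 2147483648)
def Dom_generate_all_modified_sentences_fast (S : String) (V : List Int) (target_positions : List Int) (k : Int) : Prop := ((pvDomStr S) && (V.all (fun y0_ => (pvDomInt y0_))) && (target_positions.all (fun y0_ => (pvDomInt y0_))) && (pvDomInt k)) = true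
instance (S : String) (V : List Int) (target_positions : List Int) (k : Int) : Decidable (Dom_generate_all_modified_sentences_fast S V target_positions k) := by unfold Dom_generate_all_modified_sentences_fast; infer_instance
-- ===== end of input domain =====

-- B replaces A's generate-all-combinations-then-apply scheme by an in-place backtracking
-- recursion over target_positions (alternative decomposition; return values proved equal on Pre_).

-- ===== PORT A =====
-- chr(v): exact for every Unicode scalar value, which Pre_ guarantees for the values reaching chr
def pvChr (v : Int) : Char := Char.ofNat v.toNat

def pvGenCombos (candidates : List (List Int)) (current : List Int) : List (List Int) :=
  match candidates with
  | [] => [current]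
  | c :: rest => c.flatMap (fun i => pvGenCombos rest (current ++ [i]))

-- the body of A's inner 'for pos_idx, vocab_idx in enumerate(char_combo)' loop
def pvStepA (V : List Int) (tps : List Int) (n : Nat) (st : List Char × List Int) (p : Int × Int) :
    List Char × List Int :=
  let z := PySem.List.pyGetD tps p.1 0
  if z < 0 ∨ (n : Int) ≤ z then st
  else
    let v := PySem.List.pyGetD V p.2 0
    if v ≠ -1 then (st.1.set z.toNat (pvChr v), st.2.set z.toNat 1)
    else (st.1.set z.toNat '_', st.2.set z.toNat 0)

def generate_all_modified_sentences_fast (S : String) (V : List Int) (target_positions : List Int) (k : Int) : List String × List String × List (List Int) :=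
  let pad := List.replicate k.toNat '_'                                -- spaces = '_' * k
  let init_extended := S.toList.flatMap (fun c => pad ++ [c]) ++ pad   -- ''.join([spaces+c for c in S])+spaces
  let extended_length := init_extended.length
  let init_mask := (List.range S.toList.length).foldl
      (fun m _ => m ++ List.replicate k.toNat (0 : Int) ++ [1]) [] ++ List.replicate k.toNat (0 : Int)
  let vocab_indices := PySem.List.pyRange 0 (V.length : Int) 1
  let pos_char_candidates := target_positions.map (fun _ => vocab_indices)
  (pvGenCombos pos_char_candidates []).foldl
    (fun acc combo =>
      let st := (PySem.List.enumerate combo 0).foldl (pvStepA V target_positions extended_length)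
                  (init_extended, init_mask)
      (acc.1 ++ [String.ofList st.1],
       acc.2.1 ++ [String.ofList ((PySem.List.pyRange 0 (extended_length : Int) 1).filterMap
         (fun i => if PySem.List.pyGetD st.2 i 0 = 1 then some (PySem.List.pyGetD st.1 i ' ') else none))],
       acc.2.2 ++ [st.2]))
    ([], [], [])

-- ===== PORT B =====
def pvTriApp (a b : List String × List String × List (List Int)) :
    List String × List String × List (List Int) :=
  (a.1 ++ b.1, a.2.1 ++ b.2.1, a.2.2 ++ b.2.2)

-- B's rec(d): functional rendering of the in-place backtracking (state passed, restore implicit)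
def pvRecB (V : List Int) (n : Nat) (tps : List Int) (ext : List Char) (mask : List Int) :
    List String × List String × List (List Int) :=
  match tps with
  | [] =>
    ([String.ofList ext],
     [String.ofList ((ext.zip mask).filterMap (fun p => if p.2 = 1 then some p.1 else none))],
     [mask])
  | z :: rest =>
    if z < 0 ∨ (n : Int) ≤ z then
      (V.map (fun _ => pvRecB V n rest ext mask)).foldr pvTriApp ([], [], [])
    else
      (V.map (fun v =>
        if v ≠ -1 then pvRecB V n rest (ext.set z.toNat (pvChr v)) (mask.set z.toNat 1)
        else pvRecB V n rest (ext.set z.toNat '_') (mask.set z.toNat 0))).foldr pvTriApp ([], [], [])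

def generate_all_modified_sentences_fast_alt (S : String) (V : List Int) (target_positions : List Int) (k : Int) : List String × List String × List (List Int) :=
  let pad := List.replicate k.toNat '_'
  let st := S.toList.foldl
      (fun (em : List Char × List Int) c =>
        (em.1 ++ pad ++ [c], em.2 ++ List.replicate pad.length (0 : Int) ++ [1])) ([], [])
  let ext := st.1 ++ pad
  let mask := st.2 ++ List.replicate pad.length (0 : Int)
  pvRecB V ext.length target_positions ext mask

-- ===== PRECONDITION & SPEC =====
-- Pre_ excludes exactly the inputs where some combination would pass a value other than -1 that is
-- not a Unicode scalar value to chr: chr raises ValueError on negatives and values ≥ 0x110000, and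
-- on surrogates (0xD800–0xDFFF) Python returns a lone-surrogate string not representable as a Lean String.
def Pre_generate_all_modified_sentences_fast (S : String) (V : List Int) (target_positions : List Int) (k : Int) : Prop :=
  (∃ z ∈ target_positions, 0 ≤ z ∧ z < ((S.length * (k.toNat + 1) + k.toNat : Nat) : Int)) →
    ∀ v ∈ V, v = -1 ∨ (0 ≤ v ∧ v < 55296) ∨ (57343 < v ∧ v < 1114112)
instance (S : String) (V : List Int) (target_positions : List Int) (k : Int) : Decidable (Pre_generate_all_modified_sentences_fast S V target_positions k) := by unfold Pre_generate_all_modified_sentences_fast; infer_instance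

def pvWitness_generate_all_modified_sentences_fast : String × List Int × List Int × Int :=
  ("ab", [97, -1], [1, 4], 1)

def Spec_generate_all_modified_sentences_fast (S : String) (V : List Int) (target_positions : List Int) (k : Int) (out : List String × List String × List (List Int)) : Prop := out = generate_all_modified_sentences_fast_alt S V target_positions k
instance (S : String) (V : List Int) (target_positions : List Int) (k : Int) (out : List String × List String × List (List Int)) : Decidable (Spec_generate_all_modified_sentences_fast S V target_positions k out) := by unfold Spec_generate_all_modified_sentences_fast; infer_instance

-- ===== CLAIM (what is proved, stated in full; the proofs are below) =====
def Claim_equal_generate_all_modified_sentences_fast : Prop := ∀ (S : String) (V : List Int) (target_positions : List Int) (k : Int), Dom_generate_all_modified_sentences_fast S V target_positions k → Pre_generate_all_modified_sentences_fast S V target_positions k → Spec_generate_all_modified_sentences_fast S V target_positions k (generate_all_modified_sentences_fast S V target_positions k)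

-- ===== LEMMAS AND PROOFS =====

-- one application of a substitution (z, value v) to the state; both ports' branch bodies
def pvStep (n : Nat) (s : List Char × List Int) (z v : Int) : List Char × List Int :=
  if z < 0 ∨ (n : Int) ≤ z then s
  else if v ≠ -1 then (s.1.set z.toNat (pvChr v), s.2.set z.toNat 1)
  else (s.1.set z.toNat '_', s.2.set z.toNat 0)

-- zip-form of A's inner loop body
def pvStepZ (V : List Int) (n : Nat) (st : List Char × List Int) (p : Int × Int) :
    List Char × List Int :=
  pvStep n st p.1 (PySem.List.pyGetD V p.2 0)

-- the tree of leaf states, shared abstraction both ports are reduced to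
def pvStates (V : List Int) (n : Nat) : List Int → (List Char × List Int) → List (List Char × List Int)
  | [], s => [s]
  | z :: rest, s => V.flatMap (fun v => pvStates V n rest (pvStep n s z v))

def pvShrunk (s : List Char × List Int) : List Char :=
  (s.1.zip s.2).filterMap (fun p => if p.2 = 1 then some p.1 else none)

def pvPack (l : List (List Char × List Int)) : List String × List String × List (List Int) :=
  (l.map (fun s => String.ofList s.1), l.map (fun s => String.ofList (pvShrunk s)), l.map (·.2))

theorem pvPack_append (a b : List (List Char × List Int)) :
    pvPack (a ++ b) = pvTriApp (pvPack a) (pvPack b) := by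
  simp [pvPack, pvTriApp]

theorem pvPack_flatMap {α : Type} (l : List α) (g : α → List (List Char × List Int)) :
    pvPack (l.flatMap g) = (l.map (fun x => pvPack (g x))).foldr pvTriApp ([], [], []) := by
  induction l with
  | nil => simp [pvPack]
  | cons x l ih => simp [List.flatMap_cons, pvPack_append, ih]

-- B's recursion computes the packed leaf states
theorem pvRecB_eq (V : List Int) (n : Nat) (tps : List Int) :
    ∀ ext mask, pvRecB V n tps ext mask = pvPack (pvStates V n tps (ext, mask)) := by
  induction tps with
  | nil => intro ext mask; simp [pvRecB, pvStates, pvPack, pvShrunk]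
  | cons z rest ih =>
    intro ext mask
    by_cases h : z < 0 ∨ (n : Int) ≤ z
    · simp [pvRecB, h, pvStates, pvStep, pvPack_flatMap, ih]
    · simp only [pvRecB, if_neg h, pvStates, pvPack_flatMap]
      congr 1
      refine List.map_congr_left (fun v _ => ?_)
      by_cases hv : v ≠ -1 <;> simp [hv, ih, pvStep, h]

-- A's accumulator fold is three maps
theorem pvFoldAcc (combos : List (List Int)) (E Sh : List Int → String)
    (M : List Int → List Int) :
    ∀ acc : List String × List String × List (List Int),
      combos.foldl (fun acc c => (acc.1 ++ [E c], acc.2.1 ++ [Sh c], acc.2.2 ++ [M c])) acc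
      = (acc.1 ++ combos.map E, acc.2.1 ++ combos.map Sh, acc.2.2 ++ combos.map M) := by
  induction combos with
  | nil => intro acc; simp
  | cons c combos ih => intro acc; simp [ih]

-- enumerate-with-absolute-index fold = zip fold
theorem pvEnumFold (V tps : List Int) (n : Nat) :
    ∀ (combo : List Int) (d : Nat) (st : List Char × List Int), d + combo.length ≤ tps.length →
      (PySem.List.enumerate combo (d : Int)).foldl (pvStepA V tps n) st
      = (List.zip (tps.drop d) combo).foldl (pvStepZ V n) st := by
  intro combo
  induction combo with
  | nil => intro d st _; simp [PySem.List.enumerate_nil]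
  | cons i combo ih =>
    intro d st h
    have hd : d < tps.length := by simp at h; omega
    have h1 : (PySem.List.enumerate (i :: combo) (d : Int))
        = ((d : Int), i) :: PySem.List.enumerate combo ((d + 1 : Nat) : Int) := by
      rw [PySem.List.enumerate_cons]; push_cast; ring_nf
    rw [h1, List.drop_eq_getElem_cons hd]
    simp only [List.zip_cons_cons, List.foldl_cons]
    rw [ih (d + 1) _ (by simp at h ⊢; omega)]
    congr 1
    simp [pvStepA, pvStepZ, pvStep, PySem.List.pyGetD_natCast, List.getElem?_eq_getElem hd]

-- generating with a non-empty prefix just prepends it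
theorem pvGenCombos_shift (cands : List (List Int)) :
    ∀ cur, pvGenCombos cands cur = (pvGenCombos cands []).map (cur ++ ·) := by
  induction cands with
  | nil => intro cur; simp [pvGenCombos]
  | cons c rest ih =>
    intro cur
    simp only [pvGenCombos, List.map_flatMap]
    refine List.flatMap_congr (fun i _ => ?_)
    rw [ih (cur ++ [i]), ih ([] ++ [i]), List.map_map]
    simp [Function.comp_def]

-- iterate over range(len(V)) looking up V  =  iterate over V
theorem pvReindex {β : Type} (V : List Int) (f : Int → List β) :
    (PySem.List.pyRange 0 (V.length : Int) 1).flatMap (fun i => f (PySem.List.pyGetD V i 0))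
    = V.flatMap f := by
  conv_rhs => rw [← PySem.List.map_pyGetD_pyRange_zero' V 0]
  rw [List.flatMap_map]

-- main correspondence: mapping the zip-fold over all combinations is the state tree
theorem pvMain (V : List Int) (n : Nat) :
    ∀ (tps : List Int) (s : List Char × List Int),
      (pvGenCombos (tps.map (fun _ => PySem.List.pyRange 0 (V.length : Int) 1)) []).map
        (fun c => (List.zip tps c).foldl (pvStepZ V n) s)
      = pvStates V n tps s := by
  intro tps
  induction tps with
  | nil => intro s; simp [pvGenCombos, pvStates]
  | cons z rest ih =>
    intro s
    simp only [List.map_cons, pvGenCombos, List.map_flatMap, pvStates]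
    rw [← pvReindex V (fun v => pvStates V n rest (pvStep n s z v))]
    refine List.flatMap_congr (fun i _ => ?_)
    rw [pvGenCombos_shift _ ([] ++ [i]), List.map_map]
    rw [← ih (pvStep n s z (PySem.List.pyGetD V i 0))]
    refine List.map_congr_left (fun c _ => ?_)
    simp [pvStepZ]

-- every combination has one entry per target position
theorem pvGenCombos_length (cands : List (List Int)) :
    ∀ cur c, c ∈ pvGenCombos cands cur → c.length = cur.length + cands.length := by
  induction cands with
  | nil => intro cur c hc; simp [pvGenCombos] at hc; simp [hc]
  | cons cd rest ih =>
    intro cur c hc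
    simp only [pvGenCombos, List.mem_flatMap] at hc
    obtain ⟨i, -, hc⟩ := hc
    have := ih (cur ++ [i]) c hc
    simp at this ⊢; omega

-- pvStep preserves the two lengths
theorem pvStep_lengths (n : Nat) (s : List Char × List Int) (z v : Int) :
    (pvStep n s z v).1.length = s.1.length ∧ (pvStep n s z v).2.length = s.2.length := by
  unfold pvStep; split_ifs <;> simp

theorem pvStates_lengths (V : List Int) (n : Nat) :
    ∀ (tps : List Int) (s t : List Char × List Int), t ∈ pvStates V n tps s →
      t.1.length = s.1.length ∧ t.2.length = s.2.length := by
  intro tps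
  induction tps with
  | nil => intro s t ht; simp [pvStates] at ht; simp [ht]
  | cons z rest ih =>
    intro s t ht
    simp only [pvStates, List.mem_flatMap] at ht
    obtain ⟨v, -, ht⟩ := ht
    have h1 := ih _ t ht
    have h2 := pvStep_lengths n s z v
    omega

-- index-comprehension shrunk = zip shrunk (getD form)
theorem pvShrunk_getD (e : List Char) :
    ∀ m : List Int, m.length = e.length →
      (List.range e.length).filterMap
        (fun j => if m.getD j 0 = 1 then some (e.getD j ' ') else none)
      = pvShrunk (e, m) := by
  induction e with
  | nil => intro m h; simp [pvShrunk]
  | cons c e ih =>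
    intro m h
    match m with
    | x :: m =>
      simp only [List.length_cons, List.range_succ_eq_map, List.filterMap_cons,
        List.filterMap_map]
      have := ih m (by simpa using h)
      by_cases hx : x = 1 <;> simp_all [pvShrunk]

-- A's shrunk comprehension in pyRange/pyGetD form
theorem pvShrunk_eq (e : List Char) (m : List Int) (h : m.length = e.length) :
    (PySem.List.pyRange 0 (e.length : Int) 1).filterMap
      (fun i => if PySem.List.pyGetD m i 0 = 1 then some (PySem.List.pyGetD e i ' ') else none)
    = pvShrunk (e, m) := by
  rw [PySem.List.pyRange_one, ← pvShrunk_getD e m h]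
  simp [List.filterMap_map, PySem.List.pyGetD_natCast]

-- B's base-buffer fold in flatMap form
theorem pvBuildB (pad : List Char) (zs : List Int) (l : List Char) :
    ∀ (a : List Char) (b : List Int),
      l.foldl (fun (em : List Char × List Int) c =>
        (em.1 ++ pad ++ [c], em.2 ++ zs ++ [1])) (a, b)
      = (a ++ l.flatMap (fun c => pad ++ [c]), b ++ l.flatMap (fun _ => zs ++ [1])) := by
  induction l with
  | nil => intro a b; simp
  | cons c l ih =>
    intro a b
    simp only [List.foldl_cons]
    rw [ih]
    simp [List.append_assoc]

theorem pvConstFlat {α β : Type} (l : List α) (u : List β) :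
    l.flatMap (fun _ => u) ++ u = u ++ l.flatMap (fun _ => u) := by
  induction l with
  | nil => simp
  | cons c l ih => simp only [List.flatMap_cons, List.append_assoc, ih]

-- A's mask loop in flatMap form
theorem pvMaskA (zs : List Int) (l : List Char) :
    ∀ m0 : List Int,
      (List.range l.length).foldl (fun m _ => m ++ zs ++ [1]) m0
      = m0 ++ l.flatMap (fun _ => zs ++ [1]) := by
  induction l with
  | nil => intro m0; simp
  | cons c l ih =>
    intro m0
    rw [List.length_cons, List.range_succ, List.foldl_append, ih m0]
    have h := pvConstFlat l (zs ++ [1])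
    simp only [List.flatMap_cons, List.foldl_cons, List.foldl_nil, List.append_assoc] at h ⊢
    rw [h]

theorem pvFlatMap_length {α β : Type} (l : List Char) (f : Char → List α) (g : Char → List β)
    (h : ∀ c, (f c).length = (g c).length) :
    (l.flatMap f).length = (l.flatMap g).length := by
  induction l with
  | nil => simp
  | cons c l ih => simp [h c, ih]

theorem pvInitLen (pad : List Char) (zs : List Int) (h : zs.length = pad.length)
    (l : List Char) :
    (l.flatMap (fun _ => zs ++ [1]) ++ zs).length
      = (l.flatMap (fun c => pad ++ [c]) ++ pad).length := by
  simp only [List.length_append, h,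
    pvFlatMap_length l (fun _ => zs ++ [1]) (fun c => pad ++ [c]) (fun c => by simp [h])]

-- ===== VERDICT (by name: the statement is the Claim_ definition above) =====
theorem generate_all_modified_sentences_fast_spec :
    Claim_equal_generate_all_modified_sentences_fast := by
  intro S V tps k _ _
  unfold Spec_generate_all_modified_sentences_fast
  unfold generate_all_modified_sentences_fast generate_all_modified_sentences_fast_alt
  simp only [List.length_replicate]
  rw [pvBuildB, pvMaskA, pvRecB_eq]
  simp only [List.nil_append]
  set pad := List.replicate k.toNat '_' with hpad
  set zs := List.replicate k.toNat (0 : Int) with hzs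
  set ext := S.toList.flatMap (fun c => pad ++ [c]) ++ pad with hext
  set mask := S.toList.flatMap (fun _ => zs ++ [1]) ++ zs with hmask
  set n := ext.length with hn
  set combos := pvGenCombos (tps.map (fun _ => PySem.List.pyRange 0 (V.length : Int) 1)) []
    with hcombos
  have hlen : mask.length = n := by
    rw [hn, hmask, hext]
    exact pvInitLen pad zs (by simp [hpad, hzs]) S.toList
  refine Eq.trans (pvFoldAcc combos
    (fun c => String.ofList ((PySem.List.enumerate c 0).foldl (pvStepA V tps n) (ext, mask)).1)
    (fun c => String.ofList ((PySem.List.pyRange 0 (n : Int) 1).filterMap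
      (fun i => if PySem.List.pyGetD
          ((PySem.List.enumerate c 0).foldl (pvStepA V tps n) (ext, mask)).2 i 0 = 1 then
        some (PySem.List.pyGetD
          ((PySem.List.enumerate c 0).foldl (pvStepA V tps n) (ext, mask)).1 i ' ')
        else none)))
    (fun c => ((PySem.List.enumerate c 0).foldl (pvStepA V tps n) (ext, mask)).2)
    ([], [], [])) ?_
  simp only [List.nil_append]
  have hcl : ∀ c ∈ combos, c.length = tps.length := by
    intro c hc
    simpa using pvGenCombos_length _ [] c hc
  have hF : ∀ c ∈ combos,
      (PySem.List.enumerate c 0).foldl (pvStepA V tps n) (ext, mask)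
      = (List.zip tps c).foldl (pvStepZ V n) (ext, mask) := by
    intro c hc
    have := pvEnumFold V tps n c 0 (ext, mask) (by rw [hcl c hc]; omega)
    simpa using this
  have hmap : combos.map (fun c => (List.zip tps c).foldl (pvStepZ V n) (ext, mask))
      = pvStates V n tps (ext, mask) := pvMain V n tps (ext, mask)
  have hlens : ∀ t ∈ pvStates V n tps (ext, mask), t.1.length = n ∧ t.2.length = n := by
    intro t ht
    have h := pvStates_lengths V n tps (ext, mask) t ht
    exact ⟨h.1.trans hn.symm, h.2.trans hlen⟩
  simp only [pvPack]
  rw [← hmap, List.map_map, List.map_map, List.map_map]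
  refine congrArg₂ Prod.mk ?_ (congrArg₂ Prod.mk ?_ ?_)
  · exact List.map_congr_left (fun c hc => by simp [hF c hc])
  · refine List.map_congr_left (fun c hc => ?_)
    have hmem : (List.zip tps c).foldl (pvStepZ V n) (ext, mask)
        ∈ pvStates V n tps (ext, mask) := by
      rw [← hmap]; exact List.mem_map_of_mem hc
    obtain ⟨h1, h2⟩ := hlens _ hmem
    rw [hF c hc]
    simp only [Function.comp_def]
    generalize hg : (List.zip tps c).foldl (pvStepZ V n) (ext, mask) = t at h1 h2 ⊢
    rw [← h1, pvShrunk_eq t.1 t.2 (by omega)]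
  · exact List.map_congr_left (fun c hc => by simp [hF c hc])
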